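-- pv_equiv track=rewrite | github.com/poluzerovT/mms-12-2025 | Voronenko/lab2/main.py | get_dominant_series_length
-- ===== SOURCE A (Python) =====
-- from typing import List, Tuple, Dict, Callable
--
-- def get_dominant_series_length(scores_a: List[int], scores_b: List[int]) -> int:
--     max_series = 0
--     current_series = 0
--
--     for score_a, score_b in zip(scores_a, scores_b):
--         if (score_a == 5 and score_b == 0) or (score_a == 0 and score_b == 5):
--             current_series += 1
--             max_series = max(max_series, current_series)
--         else:
--             current_series = 0
--
--     return max_series
-- ===== SOURCE B (Python) =====
-- def get_dominant_series_length(scores_a, scores_b):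
--     pairs = list(zip(scores_a, scores_b))
--     breaks = [-1] + [i for i, (a, b) in enumerate(pairs)
--                      if not ((a == 5 and b == 0) or (a == 0 and b == 5))] + [len(pairs)]
--     return max(j - i - 1 for i, j in zip(breaks, breaks[1:]))
-- ===== Notes on version B (the rewrite author's own statement) =====
-- stated objective: alternative
-- what changed: Instead of a running counter/max over the pairs, B builds the list of break indices (positions whose pair is not 5-0/0-5) with sentinels -1 and len, and returns the maximum adjacent gap minus one.
import Mathlib
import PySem

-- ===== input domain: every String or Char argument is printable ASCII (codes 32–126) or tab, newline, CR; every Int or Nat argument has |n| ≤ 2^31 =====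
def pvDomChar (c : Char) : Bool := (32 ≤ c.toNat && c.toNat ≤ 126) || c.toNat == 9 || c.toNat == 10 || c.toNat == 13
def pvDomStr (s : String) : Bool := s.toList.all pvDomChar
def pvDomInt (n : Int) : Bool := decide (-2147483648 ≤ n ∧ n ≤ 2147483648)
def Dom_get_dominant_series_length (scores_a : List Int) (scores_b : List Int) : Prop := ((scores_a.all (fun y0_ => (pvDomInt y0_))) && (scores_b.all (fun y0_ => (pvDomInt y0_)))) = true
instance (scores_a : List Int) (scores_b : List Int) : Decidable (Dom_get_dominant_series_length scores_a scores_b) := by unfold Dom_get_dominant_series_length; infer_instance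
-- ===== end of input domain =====

-- B replaces A's running counter/max bookkeeping with a break-index list (positions whose
-- pair is not dominant, with sentinels -1 and len) and takes the maximum adjacent gap
-- minus one (objective: alternative).

-- ===== PORT A =====
-- A's for-loop over zip(scores_a, scores_b) with state (max_series, current_series)
def pvALoop : List (Int × Int) → Int → Int → Int
  | [], max_series, _ => max_series
  | (score_a, score_b) :: rest, max_series, current_series =>
    if (score_a = 5 ∧ score_b = 0) ∨ (score_a = 0 ∧ score_b = 5) then
      pvALoop rest (max max_series (current_series + 1)) (current_series + 1)
    else
      pvALoop rest max_series 0

def get_dominant_series_length (scores_a : List Int) (scores_b : List Int) : Int :=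
  pvALoop (scores_a.zip scores_b) 0 0

-- ===== PORT B =====
-- the dominance test applied to a zipped pair
def pvIsDominant (p : Int × Int) : Bool := (p.1 == 5 && p.2 == 0) || (p.1 == 0 && p.2 == 5)

def get_dominant_series_length_alt (scores_a : List Int) (scores_b : List Int) : Int :=
  let pairs := scores_a.zip scores_b
  -- breaks = [-1] + [i for i,(a,b) in enumerate(pairs) if not dominant] + [len(pairs)]
  let breaks : List Int :=
    [-1] ++ ((PySem.List.enumerate pairs).filter (fun ip => !pvIsDominant ip.2)).map (fun ip => ip.1)
         ++ [(pairs.length : Int)]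
  -- max(j - i - 1 for i, j in zip(breaks, breaks[1:])); breaks has ≥ 2 elements, so
  -- the generator is never empty (the [] branch is unreachable)
  match (breaks.zip (breaks.drop 1)).map (fun ij => ij.2 - ij.1 - 1) with
  | d :: ds => ds.foldl max d
  | [] => 0

-- ===== PRECONDITION & SPEC =====
def Spec_get_dominant_series_length (scores_a : List Int) (scores_b : List Int) (out : Int) : Prop := out = get_dominant_series_length_alt scores_a scores_b
instance (scores_a : List Int) (scores_b : List Int) (out : Int) : Decidable (Spec_get_dominant_series_length scores_a scores_b out) := by unfold Spec_get_dominant_series_length; infer_instance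

-- ===== CLAIM (what is proved, stated in full; the proofs are below) =====
def Claim_equal_get_dominant_series_length : Prop := ∀ (scores_a : List Int) (scores_b : List Int), Dom_get_dominant_series_length scores_a scores_b → Spec_get_dominant_series_length scores_a scores_b (get_dominant_series_length scores_a scores_b)

-- ===== LEMMAS AND PROOFS =====

-- break indices of a flag list, counting from k
def pvBrk (k : Int) : List Bool → List Int
  | [] => []
  | true :: fs => pvBrk (k + 1) fs
  | false :: fs => k :: pvBrk (k + 1) fs

-- maximum over the gaps (minus one) of the sequence prev :: l ++ [last]
def pvMaxGap (prev : Int) : List Int → Int → Int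
  | [], last => last - prev - 1
  | x :: xs, last => max (x - prev - 1) (pvMaxGap x xs last)

-- the list of gaps of prev :: l ++ [last]
def pvGaps (prev : Int) : List Int → Int → List Int
  | [], last => [last - prev - 1]
  | x :: xs, last => (x - prev - 1) :: pvGaps x xs last

theorem pv_foldl_max_shift (l : List Int) : ∀ (a b : Int),
    List.foldl max (max a b) l = max a (List.foldl max b l) := by
  induction l with
  | nil => intro a b; simp
  | cons x l ih =>
    intro a b
    simp only [List.foldl]
    rw [max_assoc, ih]

-- the zipped adjacent-difference list of B is exactly pvGaps
theorem pv_zip_diffs (l : List Int) : ∀ (prev last : Int),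
    (((prev :: (l ++ [last])).zip (l ++ [last])).map (fun ij => ij.2 - ij.1 - 1))
      = pvGaps prev l last := by
  induction l with
  | nil => intro prev last; simp [pvGaps]
  | cons x xs ih =>
    intro prev last
    simp only [List.cons_append, List.zip_cons_cons, List.map, pvGaps]
    exact congrArg _ (ih x last)

-- folding max over pvGaps computes pvMaxGap
theorem pv_fold_gaps (l : List Int) : ∀ (prev last : Int),
    (match pvGaps prev l last with
     | d :: ds => ds.foldl max d
     | [] => (0 : Int)) = pvMaxGap prev l last := by
  induction l with
  | nil => intro prev last; simp [pvGaps, pvMaxGap]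
  | cons x xs ih =>
    intro prev last
    simp only [pvGaps, pvMaxGap]
    rw [← ih x last]
    match hg : pvGaps x xs last with
    | d :: ds =>
      show List.foldl max (max (x - prev - 1) d) ds = _
      rw [pv_foldl_max_shift]
    | [] => cases xs <;> simp [pvGaps] at hg

-- the enumerate/filter/map pipeline computes pvBrk over the flags
theorem pv_enum_brk (ps : List (Int × Int)) : ∀ (k : Int),
    ((PySem.List.enumerate ps k).filter (fun ip => !pvIsDominant ip.2)).map (fun ip => ip.1)
      = pvBrk k (ps.map pvIsDominant) := by
  induction ps with
  | nil => intro k; simp [PySem.List.enumerate_nil, pvBrk]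
  | cons p ps ih =>
    intro k
    rw [PySem.List.enumerate_cons]
    by_cases h : pvIsDominant p = true
    · simp only [List.map, List.filter, h, Bool.not_true, pvBrk]
      exact ih (k + 1)
    · have h' : pvIsDominant p = false := by revert h; cases pvIsDominant p <;> simp
      simp only [List.map, List.filter, h', Bool.not_false, pvBrk, List.map_cons]
      exact congrArg _ (ih (k + 1))

-- pvBrk shifts: pvBrk (k+1) fs = map (+1) (pvBrk k fs)
theorem pvBrk_shift (fs : List Bool) : ∀ (k : Int),
    pvBrk (k + 1) fs = (pvBrk k fs).map (fun x => x + 1) := by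
  induction fs with
  | nil => intro k; simp [pvBrk]
  | cons f fs ih =>
    intro k
    cases f
    · simp only [pvBrk, List.map]
      exact congrArg _ (ih (k + 1))
    · simp only [pvBrk]
      exact ih (k + 1)

-- pvMaxGap is shift-invariant
theorem pvMaxGap_shift (l : List Int) : ∀ (prev last : Int),
    pvMaxGap (prev + 1) (l.map (fun x => x + 1)) (last + 1) = pvMaxGap prev l last := by
  induction l with
  | nil => intro prev last; simp [pvMaxGap]
  | cons x xs ih =>
    intro prev last
    simp only [List.map, pvMaxGap]
    rw [ih x last]
    congr 1
    ring

-- pvMaxGap is at least (first element, or last) - prev - 1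
theorem pvMaxGap_ge_first (l : List Int) (prev last : Int) :
    (match l with | [] => last | x :: _ => x) - prev - 1 ≤ pvMaxGap prev l last := by
  cases l with
  | nil => simp [pvMaxGap]
  | cons x xs => exact le_max_left _ _

-- elements of pvBrk k fs are ≥ k
theorem pvBrk_ge (fs : List Bool) : ∀ (k : Int), ∀ x ∈ pvBrk k fs, k ≤ x := by
  induction fs with
  | nil => intro k x hx; simp [pvBrk] at hx
  | cons f fs ih =>
    intro k x hx
    cases f
    · simp only [pvBrk, List.mem_cons] at hx
      rcases hx with h | h
      · omega
      · have := ih (k + 1) x h; omega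
    · have := ih (k + 1) x (by simpa [pvBrk] using hx); omega

theorem pvMaxGap_ge (fs : List Bool) (prev last : Int) (h0 : 0 ≤ last) (_hp : prev ≤ -1) :
    -prev - 1 ≤ pvMaxGap prev (pvBrk 0 fs) last := by
  have h := pvMaxGap_ge_first (pvBrk 0 fs) prev last
  match hl : pvBrk 0 fs with
  | [] => rw [hl] at h; simp at h; omega
  | x :: xs =>
    have hx : (0:Int) ≤ x := pvBrk_ge fs 0 x (by rw [hl]; exact List.mem_cons_self)
    rw [hl] at h; simp at h; omega

-- A's loop computes max m (pvMaxGap (-1-c) (breaks of the flags) len)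
theorem pv_main (ps : List (Int × Int)) : ∀ (m c : Int), 0 ≤ c → c ≤ m →
    pvALoop ps m c
      = max m (pvMaxGap (-1 - c) (pvBrk 0 (ps.map pvIsDominant)) (ps.length : Int)) := by
  induction ps with
  | nil =>
    intro m c hc hcm
    simp only [pvALoop, List.map, pvBrk, pvMaxGap, List.length_nil]
    omega
  | cons p rest ih =>
    intro m c hc hcm
    obtain ⟨a, b⟩ := p
    simp only [pvALoop, List.map, List.length_cons]
    by_cases hf : (a = 5 ∧ b = 0) ∨ (a = 0 ∧ b = 5)
    · rw [if_pos hf]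
      have hflag : pvIsDominant (a, b) = true := by
        simp only [pvIsDominant]; rcases hf with ⟨h1, h2⟩ | ⟨h1, h2⟩ <;> simp [h1, h2]
      rw [hflag]
      show pvALoop rest (max m (c + 1)) (c + 1)
        = max m (pvMaxGap (-1 - c) (pvBrk (0 + 1) (rest.map pvIsDominant)) ((rest.length : Int) + 1))
      rw [ih (max m (c + 1)) (c + 1) (by omega) (le_max_right _ _)]
      rw [pvBrk_shift, show (-1 : Int) - c = (-1 - (c + 1)) + 1 by ring,
          show ((rest.length : Int) + 1) = (rest.length : Int) + 1 from rfl,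
          pvMaxGap_shift]
      have hge : -(-1 - (c + 1)) - 1 ≤ pvMaxGap (-1 - (c + 1)) (pvBrk 0 (rest.map pvIsDominant)) (rest.length : Int) :=
        pvMaxGap_ge _ _ _ (by positivity) (by omega)
      omega
    · rw [if_neg hf]
      have hflag : pvIsDominant (a, b) = false := by
        simp only [pvIsDominant]
        by_contra hcon
        simp only [Bool.not_eq_false, Bool.or_eq_true, Bool.and_eq_true, beq_iff_eq] at hcon
        exact hf (by tauto)
      rw [hflag]
      show pvALoop rest m 0
        = max m (pvMaxGap (-1 - c) (0 :: pvBrk (0 + 1) (rest.map pvIsDominant)) ((rest.length : Int) + 1))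
      rw [ih m 0 le_rfl (by omega)]
      simp only [pvMaxGap, pvBrk_shift]
      have hsh := pvMaxGap_shift (pvBrk 0 (rest.map pvIsDominant)) (-1) (rest.length : Int)
      norm_num at hsh
      rw [hsh, show (-1 - (0:Int)) = -1 by ring]
      generalize pvMaxGap (-1) (pvBrk 0 (rest.map pvIsDominant)) (rest.length : Int) = G
      omega

-- B's port computes pvMaxGap (-1) (pvBrk 0 flags) len
theorem pv_alt_eq (sa sb : List Int) :
    get_dominant_series_length_alt sa sb
      = max 0 (pvMaxGap (-1) (pvBrk 0 ((sa.zip sb).map pvIsDominant)) (((sa.zip sb).length : Int))) := by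
  unfold get_dominant_series_length_alt
  simp only []
  rw [pv_enum_brk]
  have hd : ∀ (l : List Int) (last : Int),
      (((-1 : Int) :: (l ++ [last])).drop 1) = l ++ [last] := by intro l last; rfl
  rw [show ([(-1 : Int)] ++ pvBrk 0 ((sa.zip sb).map pvIsDominant) ++ [((sa.zip sb).length : Int)])
        = (-1 : Int) :: (pvBrk 0 ((sa.zip sb).map pvIsDominant) ++ [((sa.zip sb).length : Int)]) from rfl]
  rw [hd, pv_zip_diffs, pv_fold_gaps]
  have := pvMaxGap_ge ((sa.zip sb).map pvIsDominant) (-1) ((sa.zip sb).length : Int)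
    (by positivity) (by omega)
  omega

-- ===== VERDICT (by name: the statement is the Claim_ definition above) =====
theorem get_dominant_series_length_spec : Claim_equal_get_dominant_series_length := by
  intro sa sb _
  show get_dominant_series_length sa sb = get_dominant_series_length_alt sa sb
  rw [pv_alt_eq]
  unfold get_dominant_series_length
  rw [pv_main _ 0 0 le_rfl le_rfl]
  norm_num
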